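-- pv_equiv track=rewrite | github.com/ocaml-flambda/mopsa-ocaml | benchmarks/pytypes/typpete/todo/eight_queens.py | add_queen
-- ===== SOURCE A (Python) =====
-- BOARD_SIZE = 8
--
-- class BailOut(Exception):
--     pass
--
-- def validate(queens):
--     left = right = col = queens[-1]
--     for r in queens[:-1][::-1]:
--         left, right = left-1, right+1
--         if r in (left, col, right):
--             raise BailOut
--
-- def add_queen(queens):
--     for i in range(BOARD_SIZE):
--         test_queens = queens + [i]
--         try:
--             validate(test_queens)
--             if len(test_queens) == BOARD_SIZE:
--                 return test_queens
--             else: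
--                 # return add_queen(test_queens)
--                 return test_queens
--         except BailOut:
--             pass
--     # cheating a bit
--     return [1]
-- ===== SOURCE B (Python) =====
-- BOARD_SIZE = 8
--
-- def add_queen(queens):
--     forbidden = set()
--     for d, q in enumerate(reversed(queens), 1):
--         forbidden.update((q, q + d, q - d))
--     for i in range(BOARD_SIZE):
--         if i not in forbidden:
--             return queens + [i]
--     return [1]
-- ===== Notes on version B (the rewrite author's own statement) =====
-- stated objective: simpler
-- what changed: Builds a precomputed set of attacked columns in one pass over the existing queens, then scans the 8 candidate columns against it, replacing the per-candidate validate scan with exception-based control flow (and its dead len==BOARD_SIZE branch).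
import Mathlib
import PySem

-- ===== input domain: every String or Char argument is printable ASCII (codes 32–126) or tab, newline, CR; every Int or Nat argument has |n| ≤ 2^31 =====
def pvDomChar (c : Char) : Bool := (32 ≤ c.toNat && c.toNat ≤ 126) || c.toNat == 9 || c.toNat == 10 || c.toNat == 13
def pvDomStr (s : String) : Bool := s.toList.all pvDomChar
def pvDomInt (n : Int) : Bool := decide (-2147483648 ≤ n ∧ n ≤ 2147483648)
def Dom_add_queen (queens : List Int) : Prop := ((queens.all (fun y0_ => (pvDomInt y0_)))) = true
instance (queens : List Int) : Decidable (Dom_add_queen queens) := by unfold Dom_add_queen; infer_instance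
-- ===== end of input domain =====

-- B precomputes the set of attacked columns in one pass over the queens, then scans the
-- candidate columns once, instead of A's per-candidate validate scan with a BailOut exception.


-- ===== PORT A =====
-- validate(test_queens) where test_queens = queens + [i]: col = left = right = i,
-- the loop runs over queens[:-1][::-1] = queens.reverse; returns true iff BailOut is raised.
def validateRaises (col left right : Int) : List Int → Bool
  | [] => false
  | r :: rs =>
    let l := left - 1
    let rt := right + 1
    if r = l ∨ r = col ∨ r = rt then true else validateRaises col l rt rs

def addQueenLoopA (queens : List Int) : List Int → List Int
  | [] => [1]  -- cheating a bit
  | i :: rest =>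
    let test_queens := queens ++ [i]
    if validateRaises i i i queens.reverse then addQueenLoopA queens rest
    else if test_queens.length = 8 then test_queens else test_queens

def add_queen (queens : List Int) : List Int :=
  addQueenLoopA queens (PySem.List.pyRange 0 8 1)

-- ===== PORT B =====
-- for d, q in enumerate(reversed(queens), 1): forbidden.update((q, q+d, q-d))
def fbLoop (s : PySem.Set Int) (d : Int) : List Int → PySem.Set Int
  | [] => s
  | q :: rs => fbLoop (((s.add q).add (q + d)).add (q - d)) (d + 1) rs

def addQueenLoopB (queens : List Int) (fb : PySem.Set Int) : List Int → List Int
  | [] => [1]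
  | i :: rest => if fb.contains i then addQueenLoopB queens fb rest else queens ++ [i]

def add_queen_alt (queens : List Int) : List Int :=
  let forbidden := fbLoop PySem.Set.empty 1 queens.reverse
  addQueenLoopB queens forbidden (PySem.List.pyRange 0 8 1)

-- ===== PRECONDITION & SPEC =====
def Spec_add_queen (queens : List Int) (out : List Int) : Prop := out = add_queen_alt queens
instance (queens : List Int) (out : List Int) : Decidable (Spec_add_queen queens out) := by unfold Spec_add_queen; infer_instance

-- ===== CLAIM (what is proved, stated in full; the proofs are below) =====
def Claim_equal_add_queen : Prop := ∀ (queens : List Int), Dom_add_queen queens → Spec_add_queen queens (add_queen queens)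

-- ===== LEMMAS AND PROOFS =====

-- membership in the set built by fbLoop, against validateRaises on the same (reversed) list
theorem fbLoop_contains (rs : List Int) : ∀ (s : PySem.Set Int) (m col : Int),
    (fbLoop s (m + 1) rs).contains col
      = (s.contains col || validateRaises col (col - m) (col + m) rs) := by
  induction rs with
  | nil => intro s m col; simp [fbLoop, validateRaises]
  | cons q rs ih =>
    intro s m col
    show (fbLoop (((s.add q).add (q + (m+1))).add (q - (m+1))) ((m+1) + 1) rs).contains col = _
    rw [ih _ (m + 1) col]
    simp only [validateRaises]
    have hadd : (((s.add q).add (q + (m+1))).add (q - (m+1))).contains col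
        = (s.contains col || (col = q || col = q + (m+1) || col = q - (m+1))) := by
      simp [PySem.Set.mem_add, Bool.or_assoc]
    rw [hadd]
    by_cases hc : q = col - m - 1 ∨ q = col ∨ q = col + m + 1
    · have : (col = q || col = q + (m+1) || col = q - (m+1)) = true := by
        rcases hc with h | h | h <;> simp [h] <;> omega
      simp [hc, this]
    · have : (col = q || col = q + (m+1) || col = q - (m+1)) = false := by
        simp only [Bool.or_eq_false_iff, decide_eq_false_iff_not]
        refine ⟨⟨?_, ?_⟩, ?_⟩ <;> intro h <;> exact hc (by omega)
      have e1 : col - m - 1 = col - (m+1) := by ring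
      have e2 : col + m + 1 = col + (m+1) := by ring
      simp only [if_neg hc, this]
      rw [e1, e2]
      simp

theorem fb_contains (queens : List Int) (col : Int) :
    (fbLoop PySem.Set.empty 1 queens.reverse).contains col
      = validateRaises col col col queens.reverse := by
  have h := fbLoop_contains queens.reverse PySem.Set.empty 0 col
  simpa [PySem.Set.empty] using h

theorem loops_eq (queens : List Int) (is : List Int) :
    addQueenLoopA queens is
      = addQueenLoopB queens (fbLoop PySem.Set.empty 1 queens.reverse) is := by
  induction is with
  | nil => rfl
  | cons i rest ih =>
    simp only [addQueenLoopA, addQueenLoopB, fb_contains, ih, ite_self]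

-- ===== VERDICT (by name: the statement is the Claim_ definition above) =====
theorem add_queen_spec : Claim_equal_add_queen := by
  intro queens _
  show add_queen queens = add_queen_alt queens
  unfold add_queen add_queen_alt
  exact loops_eq queens _
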